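-- pv_equiv track=rewrite | github.com/mhlee21/TIL | Algorithm/src/2022 Dev-Matching/s1.py | solution
-- ===== SOURCE A (Python) =====
-- def solution(grade):
--     answer = 0
--     for idx in range(1,len(grade)):
--         if grade[idx-1] > grade[idx]:                   # 앞의 점수가 현재 점수보다 큰 경우
--             for i in range(idx):                        # 이전 점수들을 모두 현재 점수와 같게 만들어주고 그 차이를 저장한다.
--                 if grade[i] > grade[idx]:
--                     answer += (grade[i] - grade[idx])
--                     grade[i] = grade[idx]
--     return answer
-- ===== SOURCE B (Python) =====
-- def solution(grade):
--     answer = 0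
--     m = None
--     for x in reversed(grade):
--         if m is None or x < m:
--             m = x
--         else:
--             answer += x - m
--     return answer
-- ===== Notes on version B (the rewrite author's own statement) =====
-- stated objective: faster
-- what changed: Replaced A's conditional quadratic re-sweep of the whole prefix at every descent by a single reversed pass that tracks the running suffix minimum and sums each element's excess over it; B also does not mutate the input list (A overwrites grade in place), the equivalence is about the return value.
import Mathlib
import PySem

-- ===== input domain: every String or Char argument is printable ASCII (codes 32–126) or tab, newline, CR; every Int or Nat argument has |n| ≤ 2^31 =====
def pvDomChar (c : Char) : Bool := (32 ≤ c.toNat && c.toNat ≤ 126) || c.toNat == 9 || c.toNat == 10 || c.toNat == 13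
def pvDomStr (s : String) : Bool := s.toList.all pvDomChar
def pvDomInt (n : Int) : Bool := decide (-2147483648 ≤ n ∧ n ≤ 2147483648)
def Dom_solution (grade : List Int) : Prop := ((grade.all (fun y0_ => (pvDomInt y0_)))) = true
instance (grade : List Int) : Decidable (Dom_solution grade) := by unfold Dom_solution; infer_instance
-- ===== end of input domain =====

-- B replaces A's quadratic conditional prefix re-sweeps by one reversed pass over a running
-- suffix minimum (measured faster, asymptotic); A mutates its argument in place, B does not —
-- the equivalence proved here is about the RETURN value only.

-- ===== PORT A =====
def solution (grade : List Int) : Int :=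
  ((PySem.List.pyRange 1 (grade.length : Int) 1).foldl
    (fun (st : List Int × Int) idx =>
      if PySem.List.pyGetD st.1 (idx - 1) 0 > PySem.List.pyGetD st.1 idx 0 then
        (PySem.List.pyRange 0 idx 1).foldl
          (fun (st2 : List Int × Int) i =>
            if PySem.List.pyGetD st2.1 i 0 > PySem.List.pyGetD st2.1 idx 0 then
              (PySem.List.pySetD st2.1 i (PySem.List.pyGetD st2.1 idx 0),
               st2.2 + (PySem.List.pyGetD st2.1 i 0 - PySem.List.pyGetD st2.1 idx 0))
            else st2)
          st
      else st)
    (grade, 0)).2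

-- ===== PORT B =====
def solution_alt (grade : List Int) : Int :=
  (grade.reverse.foldl
    (fun (st : Option Int × Int) x =>
      match st.1 with
      | none => (some x, st.2)
      | some m => if x < m then (some x, st.2) else (st.1, st.2 + (x - m)))
    (none, 0)).2

-- ===== PRECONDITION & SPEC =====
def Spec_solution (grade : List Int) (out : Int) : Prop := out = solution_alt grade
instance (grade : List Int) (out : Int) : Decidable (Spec_solution grade out) := by unfold Spec_solution; infer_instance

-- ===== CLAIM (what is proved, stated in full; the proofs are below) =====
def Claim_equal_solution : Prop := ∀ (grade : List Int), Dom_solution grade → Spec_solution grade (solution grade)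

-- ===== LEMMAS AND PROOFS =====

-- running minimum of x :: xs
def minl (x : Int) (xs : List Int) : Int := xs.foldl min x

-- suffix-minimum transform: (sm l)[i] = min of l[i:]
def sm : List Int → List Int
  | [] => []
  | x :: xs => minl x xs :: sm xs

theorem minl_append (x : Int) (xs : List Int) (v : Int) :
    minl x (xs ++ [v]) = min (minl x xs) v := by
  simp [minl, List.foldl_append]

theorem foldl_min_comm (a b : Int) (l : List Int) :
    l.foldl min (min a b) = min a (l.foldl min b) := by
  induction l generalizing b with
  | nil => simp
  | cons c l ih => simp only [List.foldl_cons, min_assoc, ih]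

theorem minl_cons (x y : Int) (ys : List Int) :
    minl x (y :: ys) = min x (minl y ys) := by
  simp only [minl, List.foldl_cons]
  exact foldl_min_comm x y ys

theorem sm_append (p : List Int) (v : Int) :
    sm (p ++ [v]) = (sm p).map (fun y => min y v) ++ [v] := by
  induction p with
  | nil => simp [sm, minl]
  | cons x xs ih => simp [sm, ih, minl_append]

theorem length_sm (p : List Int) : (sm p).length = p.length := by
  induction p with
  | nil => rfl
  | cons x xs ih => simp [sm, ih]

theorem mem_sm_le (p : List Int) (v : Int) :
    ∀ y ∈ sm (p ++ [v]), y ≤ v := by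
  intro y hy
  rw [sm_append] at hy
  rcases List.mem_append.1 hy with h | h
  · rcases List.mem_map.1 h with ⟨z, _, rfl⟩
    exact min_le_right z v
  · simp_all

theorem sum_sub_min (s : List Int) (v : Int) :
    ((s.map (fun y => y - min y v)).sum) = s.sum - ((s.map (fun y => min y v)).sum) := by
  induction s with
  | nil => simp
  | cons x xs ih => simp [ih]; ring

theorem pyGetD_at_len (A : List Int) (z : Int) (r : List Int) (n : Nat) (hn : n = A.length) :
    PySem.List.pyGetD (A ++ z :: r) (n : Int) 0 = z := by
  subst hn
  rw [PySem.List.pyGetD_natCast]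
  simp [List.getD]

theorem set_at_len (A : List Int) (z : Int) (r : List Int) (n : Nat) (hn : n = A.length) (w : Int) :
    (A ++ z :: r).set n w = A ++ w :: r := by
  subst hn
  rw [List.set_append]
  simp

-- B's loop over the reversed list computes (suffix minimum, total excess over it)
theorem alt_loop (x : Int) (xs : List Int) (a : Int) :
    ((x :: xs).reverse.foldl
      (fun (st : Option Int × Int) y =>
        match st.1 with
        | none => (some y, st.2)
        | some m => if y < m then (some y, st.2) else (st.1, st.2 + (y - m)))
      (none, a))
    = (some (minl x xs), a + ((x :: xs).sum - (sm (x :: xs)).sum)) := by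
  induction xs generalizing x a with
  | nil => simp [minl, sm]
  | cons y ys ih =>
    have h : (x :: y :: ys).reverse = (y :: ys).reverse ++ [x] := by simp
    rw [h, List.foldl_append, ih y a]
    simp only [List.foldl_cons, List.foldl_nil]
    rw [minl_cons]
    rcases lt_or_ge x (minl y ys) with hlt | hge
    · simp [hlt, min_eq_left hlt.le, sm, minl_cons]
    · have hnlt : ¬ x < minl y ys := not_lt.2 hge
      simp only [hnlt]
      simp [min_eq_right hge, sm, minl_cons]
      ring

-- A's inner loop: cut every entry of the tracked prefix down to v, summing the cuts
theorem inner_loop (v idx : Int) (t : List Int) :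
    ∀ (p u : List Int) (a : Int), idx = ((p.length + u.length : Nat) : Int) →
    ((PySem.List.pyRange 0 (p.length : Int) 1).foldl
      (fun (st2 : List Int × Int) i =>
        if PySem.List.pyGetD st2.1 i 0 > PySem.List.pyGetD st2.1 idx 0 then
          (PySem.List.pySetD st2.1 i (PySem.List.pyGetD st2.1 idx 0),
           st2.2 + (PySem.List.pyGetD st2.1 i 0 - PySem.List.pyGetD st2.1 idx 0))
        else st2)
      (p ++ u ++ v :: t, a))
    = ((p.map (fun y => min y v)) ++ u ++ v :: t,
       a + ((p.map (fun y => y - min y v)).sum)) := by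
  intro p
  induction p using List.reverseRecOn with
  | nil =>
    intro u a h
    simp [pysem]
  | append_singleton q z ih =>
    intro u a h
    have hq : (0:Int) ≤ (q.length : Int) := by positivity
    have hcast : (((q ++ [z]).length : Nat) : Int) = (q.length : Int) + 1 := by
      simp
    rw [hcast, PySem.List.pyRange_one_succ_right hq, List.foldl_append]
    have hstate : (q ++ [z]) ++ u ++ v :: t = q ++ (z :: u) ++ v :: t := by simp
    have hidx : idx = (((q.length + (z :: u).length : Nat)) : Int) := by
      rw [h]; congr 1; simp; omega
    rw [hstate, ih (z :: u) a hidx]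
    simp only [List.foldl_cons, List.foldl_nil]
    have e1 : (q.map (fun y => min y v)) ++ (z :: u) ++ v :: t
        = (q.map (fun y => min y v)) ++ z :: (u ++ v :: t) := by simp
    have e2 : (q.map (fun y => min y v)) ++ (z :: u) ++ v :: t
        = ((q.map (fun y => min y v)) ++ z :: u) ++ v :: t := by simp
    have hz : PySem.List.pyGetD ((q.map (fun y => min y v)) ++ (z :: u) ++ v :: t) ((q.length : Nat) : Int) 0 = z := by
      rw [e1]; exact pyGetD_at_len _ z _ _ (by simp)
    have hv : PySem.List.pyGetD ((q.map (fun y => min y v)) ++ (z :: u) ++ v :: t) idx 0 = v := by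
      rw [e2, hidx]
      exact pyGetD_at_len _ v _ _ (by simp only [List.length_append, List.length_map, List.length_cons])
    simp only [hz, hv]
    by_cases hzv : z > v
    · rw [if_pos hzv]
      have hset : PySem.List.pySetD ((q.map (fun y => min y v)) ++ (z :: u) ++ v :: t) ((q.length : Nat) : Int) v
          = (q.map (fun y => min y v)) ++ v :: (u ++ v :: t) := by
        rw [e1, PySem.List.pySetD_natCast]
        exact set_at_len _ z _ _ (by simp) v
      rw [hset]
      rw [Prod.ext_iff]
      refine ⟨by simp [min_eq_right (le_of_lt hzv)], ?_⟩
      simp [min_eq_right (le_of_lt hzv)]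
      ring
    · rw [if_neg hzv]
      rw [not_lt] at hzv
      rw [Prod.ext_iff]
      exact ⟨by simp [min_eq_left hzv], by simp [min_eq_left hzv]⟩

-- A's outer loop invariant: after the first k steps the list holds the suffix minima
-- of its first k entries and the answer holds the total cut so far
theorem outer_loop (l : List Int) (k : Nat) (hk1 : 1 ≤ k) (hk : k ≤ l.length) :
    ((PySem.List.pyRange 1 (k : Int) 1).foldl
      (fun (st : List Int × Int) idx =>
        if PySem.List.pyGetD st.1 (idx - 1) 0 > PySem.List.pyGetD st.1 idx 0 then
          (PySem.List.pyRange 0 idx 1).foldl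
            (fun (st2 : List Int × Int) i =>
              if PySem.List.pyGetD st2.1 i 0 > PySem.List.pyGetD st2.1 idx 0 then
                (PySem.List.pySetD st2.1 i (PySem.List.pyGetD st2.1 idx 0),
                 st2.2 + (PySem.List.pyGetD st2.1 i 0 - PySem.List.pyGetD st2.1 idx 0))
              else st2)
            st
        else st)
      (l, 0))
    = (sm (l.take k) ++ l.drop k, (l.take k).sum - (sm (l.take k)).sum) := by
  induction k, hk1 using Nat.le_induction with
  | base =>
    cases l with
    | nil => simp at hk
    | cons x xs => simp [PySem.List.pyRange_one, sm, minl]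
  | succ k hk1 ih =>
    have hkl : k < l.length := by omega
    have hcast : (((k+1 : Nat)) : Int) = (k : Int) + 1 := by push_cast; ring
    rw [hcast, PySem.List.pyRange_one_succ_right (by exact_mod_cast hk1), List.foldl_append,
        ih (by omega)]
    simp only [List.foldl_cons, List.foldl_nil]
    set p := l.take k with hp
    have hplen : p.length = k := by simp [hp]; omega
    set v := l[k] with hv
    have hdrop : l.drop k = v :: l.drop (k+1) := List.drop_eq_getElem_cons hkl
    have htake1 : l.take (k+1) = p ++ [v] := by
      rw [hp, hv]
      simpa [List.concat_eq_append] using (List.take_concat_get hkl).symm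
    -- p itself ends with l[k-1]
    have hk1l : k - 1 < l.length := by omega
    set w := l[k-1] with hw
    have hpw : p = l.take (k-1) ++ [w] := by
      rw [hp, hw]
      conv_lhs => rw [show k = k - 1 + 1 from by omega]
      simpa [List.concat_eq_append] using (List.take_concat_get hk1l).symm
    have hsmlen : (sm p).length = k := by rw [length_sm, hplen]
    -- the two reads
    have hread_v : PySem.List.pyGetD (sm p ++ l.drop k) (k : Int) 0 = v := by
      rw [hdrop]
      exact pyGetD_at_len _ v _ k hsmlen.symm
    have hread_w : PySem.List.pyGetD (sm p ++ l.drop k) ((k : Int) - 1) 0 = w := by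
      have hc : ((k : Int) - 1) = ((k - 1 : Nat) : Int) := by omega
      rw [hc, hdrop, hpw, sm_append, List.append_assoc]
      exact pyGetD_at_len _ w _ (k-1) (by simp [length_sm]; omega)
    rw [hread_v, hread_w]
    by_cases hwv : w > v
    · rw [if_pos hwv]
      have hrange : (k : Int) = (((sm p).length : Nat) : Int) := by rw [hsmlen]
      have hst : sm p ++ l.drop k = sm p ++ [] ++ v :: l.drop (k+1) := by
        simp [hdrop]
      rw [hst, hrange,
          inner_loop v ((((sm p).length : Nat) : Int)) (l.drop (k+1)) (sm p) [] _ (by simp)]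
      rw [Prod.ext_iff]
      constructor
      · simp [htake1, sm_append]
      · simp only [htake1, sm_append, sum_sub_min, List.sum_append, List.sum_cons, List.sum_nil]
        ring
    · rw [if_neg hwv]
      rw [not_lt] at hwv
      have hmapid : (sm p).map (fun y => min y v) = sm p := by
        have : ∀ y ∈ sm p, min y v = y := by
          intro y hy
          have hyw : y ≤ w := by
            rw [hpw] at hy
            exact mem_sm_le _ _ y hy
          exact min_eq_left (le_trans hyw hwv)
        calc (sm p).map (fun y => min y v) = (sm p).map id := List.map_congr_left this
          _ = sm p := List.map_id _
      rw [Prod.ext_iff]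
      constructor
      · simp [htake1, sm_append, hmapid, hdrop]
      · simp [htake1, sm_append, hmapid]

-- ===== VERDICT (by name: the statement is the Claim_ definition above) =====
theorem solution_spec : Claim_equal_solution := by
  unfold Claim_equal_solution
  intro grade _
  unfold Spec_solution
  cases grade with
  | nil => rfl
  | cons x xs =>
    unfold solution solution_alt
    rw [outer_loop (x :: xs) (x :: xs).length (by simp) (le_refl _), alt_loop x xs 0]
    simp
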